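-- pv_equiv track=rewrite | github.com/Glenferdinza/Easy_Document | backend/youtube_converter/utils.py | validate_youtube_url
-- ===== SOURCE A (Python) =====
-- def validate_youtube_url(url):
--     """Validate if URL is a valid YouTube URL"""
--     if not url:
--         return False
--
--     youtube_patterns = [
--         'youtube.com/watch',
--         'youtube.com/v/',
--         'youtube.com/embed/',
--         'youtu.be/',
--         'm.youtube.com/watch',
--         'www.youtube.com/watch'
--     ]
--     return any(pattern in url.lower() for pattern in youtube_patterns)
-- ===== SOURCE B (Python) =====
-- def validate_youtube_url(url):
--     """Validate if URL is a valid YouTube URL"""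
--     if not url:
--         return False
--     u = url.lower()
--     # single left-to-right scan: at each position check whether one of the
--     # (non-redundant) YouTube markers starts here; the m./www. variants of
--     # A's list are subsumed by 'youtube.com/watch' itself.
--     for i in range(len(u)):
--         if u.startswith('youtu.be/', i):
--             return True
--         if u.startswith('youtube.com/', i) and u.startswith(('watch', 'v/', 'embed/'), i + 12):
--             return True
--     return False
-- ===== Notes on version B (the rewrite author's own statement) =====
-- stated objective: alternative
-- what changed: Replaces six independent substring-containment searches with one positional scan of the lowercased URL that checks prefix markers at each index, after dropping the two www/mobile-prefixed patterns that are subsumed by the plain watch pattern.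
import Mathlib
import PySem

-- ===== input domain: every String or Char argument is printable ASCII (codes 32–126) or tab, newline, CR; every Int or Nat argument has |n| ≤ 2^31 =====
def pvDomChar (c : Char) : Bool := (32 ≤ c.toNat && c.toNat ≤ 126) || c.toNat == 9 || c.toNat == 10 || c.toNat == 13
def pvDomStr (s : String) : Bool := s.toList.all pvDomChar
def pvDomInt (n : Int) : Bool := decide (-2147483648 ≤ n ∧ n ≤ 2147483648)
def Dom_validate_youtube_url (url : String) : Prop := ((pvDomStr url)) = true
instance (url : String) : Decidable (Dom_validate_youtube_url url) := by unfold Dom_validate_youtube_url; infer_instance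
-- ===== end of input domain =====

-- B replaces six independent substring searches with one positional scan of the
-- lowercased URL checking prefix markers at each index (alternative decomposition).

-- ===== PORT A =====
def validate_youtube_url (url : String) : Bool :=
  if url == "" then false
  else
    let youtube_patterns : List String :=
      ["youtube.com/watch", "youtube.com/v/", "youtube.com/embed/",
       "youtu.be/", "m.youtube.com/watch", "www.youtube.com/watch"]
    youtube_patterns.any (fun pattern => PySem.Str.isIn pattern (PySem.Str.lower url))

-- ===== PORT B =====
-- the per-position test of Source B's loop body
def pvAltHit (t : List Char) : Bool :=
  "youtu.be/".toList.isPrefixOf t ||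
  ("youtube.com/".toList.isPrefixOf t &&
    ("watch".toList.isPrefixOf (t.drop 12) ||
     "v/".toList.isPrefixOf (t.drop 12) ||
     "embed/".toList.isPrefixOf (t.drop 12)))

-- Source B's for-loop over positions, as recursion over suffixes
def pvAltScan : List Char → Bool
  | [] => false
  | c :: rest => pvAltHit (c :: rest) || pvAltScan rest

def validate_youtube_url_alt (url : String) : Bool :=
  if url == "" then false
  else pvAltScan (PySem.Str.lower url).toList

-- ===== PRECONDITION & SPEC =====
def Spec_validate_youtube_url (url : String) (out : Bool) : Prop := out = validate_youtube_url_alt url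
instance (url : String) (out : Bool) : Decidable (Spec_validate_youtube_url url out) := by unfold Spec_validate_youtube_url; infer_instance

-- ===== CLAIM (what is proved, stated in full; the proofs are below) =====
def Claim_equal_validate_youtube_url : Prop := ∀ (url : String), Dom_validate_youtube_url url → Spec_validate_youtube_url url (validate_youtube_url url)

-- ===== LEMMAS AND PROOFS =====

lemma pv_prefix_append_iff {α : Type} (p q l : List α) :
    (p ++ q) <+: l ↔ p <+: l ∧ q <+: l.drop p.length := by
  induction p generalizing l with
  | nil => simp
  | cons a p ih =>
    cases l with
    | nil => simp
    | cons b l => simp [List.cons_prefix_cons, ih, and_assoc]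

lemma pvAltScan_iff (l : List Char) :
    pvAltScan l = true ↔ ∃ t, t <:+ l ∧ pvAltHit t = true := by
  induction l with
  | nil =>
    simp only [pvAltScan]
    constructor
    · intro h; cases h
    · rintro ⟨t, ht, h⟩
      rw [List.suffix_nil.mp ht] at h
      simp [pvAltHit] at h
  | cons c rest ih =>
    simp only [pvAltScan, Bool.or_eq_true, ih]
    constructor
    · rintro (h | ⟨t, ht, h⟩)
      · exact ⟨c :: rest, List.suffix_refl _, h⟩
      · exact ⟨t, ht.trans (List.suffix_cons _ _), h⟩
    · rintro ⟨t, ht, h⟩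
      rcases List.suffix_cons_iff.mp ht with h' | h'
      · exact Or.inl (h' ▸ h)
      · exact Or.inr ⟨t, h', h⟩

lemma pvAltHit_iff (t : List Char) :
    pvAltHit t = true ↔
      "youtube.com/watch".toList <+: t ∨ "youtube.com/v/".toList <+: t ∨
      "youtube.com/embed/".toList <+: t ∨ "youtu.be/".toList <+: t := by
  have e1 : ("youtube.com/watch".toList : List Char) = "youtube.com/".toList ++ "watch".toList := by rfl
  have e2 : ("youtube.com/v/".toList : List Char) = "youtube.com/".toList ++ "v/".toList := by rfl
  have e3 : ("youtube.com/embed/".toList : List Char) = "youtube.com/".toList ++ "embed/".toList := by rfl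
  have hl : ("youtube.com/".toList : List Char).length = 12 := by rfl
  simp only [pvAltHit, Bool.or_eq_true, Bool.and_eq_true, List.isPrefixOf_iff_prefix,
    e1, e2, e3, pv_prefix_append_iff, hl]
  tauto

-- the key bridge: A's six-pattern infix disjunction ↔ B's scan
lemma pv_main (L : List Char) :
    (("youtube.com/watch".toList <:+: L) ∨ ("youtube.com/v/".toList <:+: L) ∨
     ("youtube.com/embed/".toList <:+: L) ∨ ("youtu.be/".toList <:+: L) ∨
     ("m.youtube.com/watch".toList <:+: L) ∨ ("www.youtube.com/watch".toList <:+: L))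
    ↔ pvAltScan L = true := by
  rw [pvAltScan_iff]
  have sub5 : ("youtube.com/watch".toList : List Char) <:+: "m.youtube.com/watch".toList := by
    have e : ("m.youtube.com/watch".toList : List Char) = "m.".toList ++ "youtube.com/watch".toList := by rfl
    rw [e]; exact (List.suffix_append _ _).isInfix
  have sub6 : ("youtube.com/watch".toList : List Char) <:+: "www.youtube.com/watch".toList := by
    have e : ("www.youtube.com/watch".toList : List Char) = "www.".toList ++ "youtube.com/watch".toList := by rfl
    rw [e]; exact (List.suffix_append _ _).isInfix
  constructor
  · intro h
    have h4 : ("youtube.com/watch".toList <:+: L) ∨ ("youtube.com/v/".toList <:+: L) ∨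
        ("youtube.com/embed/".toList <:+: L) ∨ ("youtu.be/".toList <:+: L) := by
      rcases h with h | h | h | h | h | h
      · exact Or.inl h
      · exact Or.inr (Or.inl h)
      · exact Or.inr (Or.inr (Or.inl h))
      · exact Or.inr (Or.inr (Or.inr h))
      · exact Or.inl (sub5.trans h)
      · exact Or.inl (sub6.trans h)
    rcases h4 with h | h | h | h
    · obtain ⟨t, hp, hs⟩ := List.infix_iff_prefix_suffix.mp h
      exact ⟨t, hs, (pvAltHit_iff t).mpr (Or.inl hp)⟩
    · obtain ⟨t, hp, hs⟩ := List.infix_iff_prefix_suffix.mp h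
      exact ⟨t, hs, (pvAltHit_iff t).mpr (Or.inr (Or.inl hp))⟩
    · obtain ⟨t, hp, hs⟩ := List.infix_iff_prefix_suffix.mp h
      exact ⟨t, hs, (pvAltHit_iff t).mpr (Or.inr (Or.inr (Or.inl hp)))⟩
    · obtain ⟨t, hp, hs⟩ := List.infix_iff_prefix_suffix.mp h
      exact ⟨t, hs, (pvAltHit_iff t).mpr (Or.inr (Or.inr (Or.inr hp)))⟩
  · rintro ⟨t, hs, hhit⟩
    rcases (pvAltHit_iff t).mp hhit with h | h | h | h
    · exact Or.inl (List.infix_iff_prefix_suffix.mpr ⟨t, h, hs⟩)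
    · exact Or.inr (Or.inl (List.infix_iff_prefix_suffix.mpr ⟨t, h, hs⟩))
    · exact Or.inr (Or.inr (Or.inl (List.infix_iff_prefix_suffix.mpr ⟨t, h, hs⟩)))
    · exact Or.inr (Or.inr (Or.inr (Or.inl (List.infix_iff_prefix_suffix.mpr ⟨t, h, hs⟩))))

-- ===== VERDICT (by name: the statement is the Claim_ definition above) =====
theorem validate_youtube_url_spec : Claim_equal_validate_youtube_url := by
  intro url _
  unfold Spec_validate_youtube_url validate_youtube_url validate_youtube_url_alt
  by_cases h : url == ""
  · simp [h]
  · rw [if_neg h, if_neg h, Bool.eq_iff_iff]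
    simp only [List.any_eq_true, List.mem_cons, List.not_mem_nil, or_false,
      PySem.Str.isIn_eq, PySem.Chars.isIn_iff_infix]
    rw [← pv_main (PySem.Str.lower url).toList]
    constructor
    · rintro ⟨p, hp, hin⟩
      rcases hp with rfl | rfl | rfl | rfl | rfl | rfl
      · exact Or.inl hin
      · exact Or.inr (Or.inl hin)
      · exact Or.inr (Or.inr (Or.inl hin))
      · exact Or.inr (Or.inr (Or.inr (Or.inl hin)))
      · exact Or.inr (Or.inr (Or.inr (Or.inr (Or.inl hin))))
      · exact Or.inr (Or.inr (Or.inr (Or.inr (Or.inr hin))))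
    · intro h
      rcases h with h | h | h | h | h | h
      · exact ⟨"youtube.com/watch", by simp, h⟩
      · exact ⟨"youtube.com/v/", by simp, h⟩
      · exact ⟨"youtube.com/embed/", by simp, h⟩
      · exact ⟨"youtu.be/", by simp, h⟩
      · exact ⟨"m.youtube.com/watch", by simp, h⟩
      · exact ⟨"www.youtube.com/watch", by simp, h⟩
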